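-- pv_equiv track=rewrite | github.com/simba28/daily-codes | minStepsToMakePileEqualHeight.py | minStepsBalance
-- ===== SOURCE A (Python) =====
-- from typing import List
--
-- def minStepsBalance(piles: List[int]) -> int:
--     """
--     Time : O(N logN)
--     Space : O(1)
--     """
--
--     if len(piles) < 2:
--         return 0
--
--     piles = sorted(piles, reverse=True)
--
--     steps = 0
--
--     for i in range(1, len(piles)):
--
--         if piles[i] != piles[i-1]:
--             steps += i
--
--     return steps
-- ===== SOURCE B (Python) =====
-- def minStepsBalance(piles):
--     counts = {}
--     for p in piles:
--         counts[p] = counts.get(p, 0) + 1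
--     steps = seen = 0
--     for v in sorted(counts, reverse=True):
--         steps += seen
--         seen += counts[v]
--     return steps
-- ===== Notes on version B (the rewrite author's own statement) =====
-- stated objective: alternative
-- what changed: Replaces A's boundary scan over the full descending-sorted array (adding the index at each value change) with a frequency dictionary plus one pass over the distinct heights in descending order, accumulating a running count of taller piles.
import Mathlib
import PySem

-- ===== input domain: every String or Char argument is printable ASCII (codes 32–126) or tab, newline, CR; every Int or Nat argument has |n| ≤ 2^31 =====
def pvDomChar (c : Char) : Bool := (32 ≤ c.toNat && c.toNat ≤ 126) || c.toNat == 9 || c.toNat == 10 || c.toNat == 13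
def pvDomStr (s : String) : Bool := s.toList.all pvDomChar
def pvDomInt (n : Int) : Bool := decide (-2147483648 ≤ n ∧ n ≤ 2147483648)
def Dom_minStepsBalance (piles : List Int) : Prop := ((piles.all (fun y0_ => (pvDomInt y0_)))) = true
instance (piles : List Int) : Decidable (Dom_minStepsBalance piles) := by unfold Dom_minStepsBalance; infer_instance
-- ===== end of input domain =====

-- B builds a frequency dictionary and walks the distinct heights in descending order,
-- instead of A's boundary scan over the fully sorted array; same result, alternative algorithm.

-- ===== PORT A =====
-- literal port of A: guard, sort descending, scan indices 1..n-1 adding i at each value change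
-- (indices are always in range, so pyGetD with default 0 is exact here)
def minStepsBalance (piles : List Int) : Int :=
  if piles.length < 2 then 0
  else
    let s := PySem.List.sorted piles (fun x => x) true
    (PySem.List.pyRange 1 (PySem.List.len s) 1).foldl
      (fun steps i =>
        if PySem.List.pyGetD s i 0 ≠ PySem.List.pyGetD s (i - 1) 0 then steps + i else steps) 0

-- ===== PORT B =====
-- literal port of Source B: counting dict via get-default, then fold (steps, seen) over
-- the distinct heights sorted in descending order
def minStepsBalance_alt (piles : List Int) : Int :=
  let counts := piles.foldl (fun d p => d.insert p (d.getD p 0 + 1)) (PySem.Dict.empty : PySem.Dict Int Int)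
  ((PySem.List.sorted counts.keys (fun v => v) true).foldl
      (fun (acc : Int × Int) v => (acc.1 + acc.2, acc.2 + counts.getD v 0)) (0, 0)).1

-- ===== PRECONDITION & SPEC =====
def Spec_minStepsBalance (piles : List Int) (out : Int) : Prop := out = minStepsBalance_alt piles
instance (piles : List Int) (out : Int) : Decidable (Spec_minStepsBalance piles out) := by unfold Spec_minStepsBalance; infer_instance

-- ===== CLAIM (what is proved, stated in full; the proofs are below) =====
def Claim_equal_minStepsBalance : Prop := ∀ (piles : List Int), Dom_minStepsBalance piles → Spec_minStepsBalance piles (minStepsBalance piles)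

-- ===== LEMMAS AND PROOFS =====

-- the common value: for each distinct height v, the number of piles strictly taller than v
def pvCG (l : List Int) (v : Int) : Int := (l.countP (fun x => decide (v < x)) : Int)

def pvT (l : List Int) : Int := ∑ v ∈ l.toFinset, pvCG l v

-- A-side positional sums over the sorted list
def pvSA (s : List Int) : Int :=
  ((List.range (s.length - 1)).map
    (fun k => if s.getD (k+1) 0 ≠ s.getD k 0 then ((k : Int) + 1) else 0)).sum

def pvC (s : List Int) : Int :=
  ((List.range (s.length - 1)).map
    (fun k => if s.getD (k+1) 0 ≠ s.getD k 0 then (1 : Int) else 0)).sum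

-- B-side: the (steps, seen) fold, abstracted
def pvW (c : Int → Int) : List Int → Int → Int
  | [], _ => 0
  | v :: t, b => b + pvW c t (b + c v)

lemma pvW_foldl (c : Int → Int) (ks : List Int) (a b : Int) :
    (ks.foldl (fun (acc : Int × Int) v => (acc.1 + acc.2, acc.2 + c v)) (a, b)).1
      = a + pvW c ks b := by
  induction ks generalizing a b with
  | nil => simp [pvW]
  | cons v t ih => simp [pvW, ih]; ring

lemma pvW_congr (c c' : Int → Int) (ks : List Int) (b : Int)
    (h : ∀ v ∈ ks, c v = c' v) : pvW c ks b = pvW c' ks b := by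
  induction ks generalizing b with
  | nil => rfl
  | cons v t ih =>
    simp only [pvW, h v (by simp)]
    exact congrArg _ (ih _ (fun u hu => h u (by simp [hu])))

lemma countP_add_of_iff {α : Type} (l : List α) (p q r : α → Bool)
    (h : ∀ x ∈ l, r x = (p x || q x)) (hd : ∀ x ∈ l, ¬(p x = true ∧ q x = true)) :
    l.countP r = l.countP p + l.countP q := by
  induction l with
  | nil => rfl
  | cons a t ih =>
    have ht := ih (fun x hx => h x (by simp [hx])) (fun x hx => hd x (by simp [hx]))
    have ha := h a (by simp)
    have hda := hd a (by simp)
    simp only [List.countP_cons, ht, ha]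
    rcases hp : p a <;> rcases hq : q a <;> simp_all <;> omega

lemma pvW_spec (piles ks : List Int)
    (hs : ks.Pairwise (· > ·))
    (hcov : ∀ x ∈ piles, (∀ u ∈ ks, u < x) ∨ x ∈ ks) :
    pvW (fun v => (piles.count v : Int)) ks
        ((piles.countP (fun x => decide (∀ u ∈ ks, u < x)) : Int))
      = (ks.map (pvCG piles)).sum := by
  induction ks with
  | nil => simp [pvW]
  | cons v t ih =>
    have hvt : ∀ u ∈ t, v > u := (List.pairwise_cons.mp hs).1
    have hst : t.Pairwise (· > ·) := (List.pairwise_cons.mp hs).2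
    -- the head accumulator counts exactly the piles strictly above v
    have hhead : piles.countP (fun x => decide (∀ u ∈ v :: t, u < x))
        = piles.countP (fun x => decide (v < x)) := by
      apply List.countP_congr
      intro x _
      simp only [decide_eq_true_eq]
      constructor
      · intro h'; exact h' v (by simp)
      · intro h' u hu
        rcases List.mem_cons.mp hu with rfl | hu
        · exact h'
        · exact lt_trans (hvt u hu) h'
    -- adding count v moves the threshold down to the next key
    have hsplit : piles.countP (fun x => decide (∀ u ∈ t, u < x))
        = piles.countP (fun x => decide (v < x)) + piles.countP (fun x => x == v) := by
      apply countP_add_of_iff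
      · intro x hx
        rw [Bool.eq_iff_iff]
        simp only [Bool.or_eq_true, decide_eq_true_eq, beq_iff_eq]
        constructor
        · intro hall
          rcases hcov x hx with hgt | hmem
          · exact Or.inl (hgt v (by simp))
          · rcases List.mem_cons.mp hmem with rfl | hmem
            · exact Or.inr rfl
            · exact absurd (hall x hmem) (lt_irrefl x)
        · rintro (hv | rfl)
          · intro u hu; exact lt_trans (hvt u hu) hv
          · intro u hu; exact hvt u hu
      · intro x _
        rintro ⟨h1, h2⟩
        simp only [decide_eq_true_eq, beq_iff_eq] at h1 h2
        exact absurd (h2 ▸ h1) (lt_irrefl v)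
    have hcount : (piles.count v : Int) = (piles.countP (fun x => x == v) : Int) := by
      rfl
    have hcov' : ∀ x ∈ piles, (∀ u ∈ t, u < x) ∨ x ∈ t := by
      intro x hx
      rcases hcov x hx with hgt | hmem
      · exact Or.inl (fun u hu => hgt u (by simp [hu]))
      · rcases List.mem_cons.mp hmem with rfl | hmem
        · exact Or.inl (fun u hu => hvt u hu)
        · exact Or.inr hmem
    simp only [pvW, List.map_cons, List.sum_cons]
    rw [hhead]
    have harg : (piles.countP (fun x => decide (v < x)) : Int) + (piles.count v : Int)
        = (piles.countP (fun x => decide (∀ u ∈ t, u < x)) : Int) := by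
      rw [hcount, hsplit]; push_cast; ring
    rw [harg, ih hst hcov']
    rfl

-- B computes the sum of "piles strictly taller than v" over the distinct heights
lemma alt_eq_pvT (piles : List Int) : minStepsBalance_alt piles = pvT piles := by
  unfold minStepsBalance_alt
  rw [PySem.Dict.foldl_insert_getD_add_one_eq_counter, pvW_foldl,
    PySem.Dict.keys_counter]
  have hmem : ∀ x : Int,
      x ∈ PySem.List.sorted (PySem.Set.ofList piles) (fun v => v) true ↔ x ∈ piles := by
    intro x
    rw [PySem.List.mem_sorted, PySem.Set.mem_ofList]
  have hperm := PySem.List.sorted_perm (PySem.Set.ofList piles) (fun v : Int => v) true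
  have hnd := hperm.nodup_iff.mpr (PySem.Set.nodup_ofList piles)
  have hge := PySem.List.sorted_pairwise_rev (PySem.Set.ofList piles) (fun v : Int => v)
  have hgt : (PySem.List.sorted (PySem.Set.ofList piles) (fun v => v) true).Pairwise (· > ·) :=
    (hge.and hnd).imp (fun {a b} h => lt_of_le_of_ne h.1 (Ne.symm h.2))
  have hzero : (0 : Int) = (piles.countP (fun x => decide
      (∀ u ∈ PySem.List.sorted (PySem.Set.ofList piles) (fun v => v) true, u < x)) : Int) := by
    have h0 : piles.countP (fun x => decide
        (∀ u ∈ PySem.List.sorted (PySem.Set.ofList piles) (fun v => v) true, u < x)) = 0 := by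
      rw [List.countP_eq_zero]
      intro x hx
      simp only [decide_eq_true_eq, not_forall]
      exact ⟨x, (hmem x).mpr hx, lt_irrefl x⟩
    rw [h0]; rfl
  rw [pvW_congr _ (fun v => (piles.count v : Int)) _ _
    (fun v _ => PySem.Dict.getD_counter piles v), zero_add, hzero,
    pvW_spec piles _ hgt (fun x hx => Or.inr ((hmem x).mpr hx)),
    ← List.sum_toFinset _ hnd]
  unfold pvT
  apply Finset.sum_congr
  · ext v; simp [List.mem_toFinset, hmem v]
  · intro v _; rfl

-- A unfolds to the positional boundary sum over the descending-sorted list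
lemma foldl_ite_add {α : Type} (l : List α) (p : α → Prop) [DecidablePred p]
    (w : α → Int) (init : Int) :
    l.foldl (fun st x => if p x then st + w x else st) init
      = init + (l.map (fun x => if p x then w x else 0)).sum := by
  induction l generalizing init with
  | nil => simp
  | cons a t ih =>
    simp only [List.foldl_cons, List.map_cons, List.sum_cons, ih]
    split <;> ring

lemma A_eq_pvSA (piles : List Int) (h : ¬ piles.length < 2) :
    minStepsBalance piles = pvSA (PySem.List.sorted piles (fun x => x) true) := by
  unfold minStepsBalance
  rw [if_neg h]
  show (PySem.List.pyRange 1
        (PySem.List.len (PySem.List.sorted piles (fun x => x) true)) 1).foldl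
      (fun steps i =>
        if PySem.List.pyGetD (PySem.List.sorted piles (fun x => x) true) i 0 ≠
            PySem.List.pyGetD (PySem.List.sorted piles (fun x => x) true) (i - 1) 0
        then steps + i else steps) 0
    = pvSA (PySem.List.sorted piles (fun x => x) true)
  generalize PySem.List.sorted piles (fun x => x) true = s
  rw [PySem.List.len_eq, PySem.List.pyRange_one, List.foldl_map, foldl_ite_add, zero_add]
  have hlen : (((s.length : Int)) - 1).toNat = s.length - 1 := by omega
  rw [hlen]
  unfold pvSA
  apply congrArg List.sum
  apply List.map_congr_left
  intro k hk
  have h1 : (1 : Int) + (k : Int) = ((k + 1 : Nat) : Int) := by push_cast; ring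
  have h2 : (1 : Int) + (k : Int) - 1 = ((k : Nat) : Int) := by ring
  rw [h2, h1, PySem.List.pyGetD_natCast, PySem.List.pyGetD_natCast]
  split
  · push_cast; ring
  · rfl

-- peeling the head element off the positional sums
lemma pvC_cons (a b : Int) (t : List Int) :
    pvC (a :: b :: t) = (if b ≠ a then (1:Int) else 0) + pvC (b :: t) := by
  unfold pvC
  have hlen1 : (a :: b :: t).length - 1 = t.length + 1 := by simp
  have hlen2 : (b :: t).length - 1 = t.length := by simp
  rw [hlen1, hlen2, List.range_succ_eq_map, List.map_cons, List.sum_cons, List.map_map]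
  congr 1

lemma pvSA_cons (a b : Int) (t : List Int) :
    pvSA (a :: b :: t) = (if b ≠ a then (1:Int) else 0) + pvSA (b :: t) + pvC (b :: t) := by
  unfold pvSA pvC
  have hlen1 : (a :: b :: t).length - 1 = t.length + 1 := by simp
  have hlen2 : (b :: t).length - 1 = t.length := by simp
  rw [hlen1, hlen2, List.range_succ_eq_map, List.map_cons, List.sum_cons, List.map_map]
  have htail : (List.range t.length).map
      ((fun k => if (a :: b :: t).getD (k+1) 0 ≠ (a :: b :: t).getD k 0
          then ((k:Int)+1) else 0) ∘ Nat.succ)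
      = (List.range t.length).map (fun j =>
          (if (b :: t).getD (j+1) 0 ≠ (b :: t).getD j 0 then ((j:Int)+1) else 0)
          + (if (b :: t).getD (j+1) 0 ≠ (b :: t).getD j 0 then (1:Int) else 0)) := by
    apply List.map_congr_left
    intro j _
    simp only [Function.comp_apply, List.getD_cons_succ]
    split
    · push_cast; ring
    · ring
  rw [htail, PySem.List.sum_map_add_int]
  have hhead : (if (a :: b :: t).getD (0+1) 0 ≠ (a :: b :: t).getD 0 0
      then (((0:Nat):Int)+1) else 0) = (if b ≠ a then (1:Int) else 0) := by
    simp
  rw [hhead]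
  ring

-- on a descending list, the head can repeat only as the very next element
lemma mem_tail_iff (a b : Int) (t : List Int)
    (hp : (a :: b :: t).Pairwise (fun x y => y ≤ x)) : a ∈ b :: t ↔ a = b := by
  constructor
  · intro hmem
    rcases List.mem_cons.mp hmem with rfl | hmem
    · rfl
    · have h1 : a ≤ b := ((List.pairwise_cons.mp (List.pairwise_cons.mp hp).2).1) a hmem
      have h2 : b ≤ a := (List.pairwise_cons.mp hp).1 b (by simp)
      omega
  · intro h; simp [h]

-- boundary count = number of distinct values minus one
lemma pvC_eq (s : List Int) (hp : s.Pairwise (fun x y => y ≤ x)) (hne : s ≠ []) :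
    pvC s = (s.toFinset.card : Int) - 1 := by
  induction s with
  | nil => exact absurd rfl hne
  | cons a u ih =>
    match u with
    | [] => simp [pvC]
    | b :: t =>
      have hpu : (b :: t).Pairwise (fun x y => y ≤ x) := (List.pairwise_cons.mp hp).2
      have hiu := ih hpu (by simp)
      rw [pvC_cons, hiu]
      have hcard : (b :: t).toFinset.card ≠ 0 := by
        simp [Finset.card_eq_zero]
      by_cases hab : a = b
      · subst hab
        have hfs : (a :: a :: t).toFinset = (a :: t).toFinset := by simp
        rw [if_neg (by simp), hfs]
        ring
      · have hnm : a ∉ b :: t := fun hmem => hab ((mem_tail_iff a b t hp).mp hmem)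
        have hnm' : a ∉ (b :: t).toFinset := by simpa using hnm
        have hfs : (a :: b :: t).toFinset = insert a (b :: t).toFinset :=
          List.toFinset_cons
        rw [if_pos (Ne.symm hab), hfs, Finset.card_insert_of_notMem hnm']
        push_cast
        ring

lemma pvT_nil : pvT [] = 0 := by simp [pvT]

lemma pvT_single (x : Int) : pvT [x] = 0 := by
  simp [pvT, pvCG]

-- one step of pvT when prepending a maximal element
lemma pvT_cons (a : Int) (u : List Int) (hmax : ∀ y ∈ u, y ≤ a) :
    pvT (a :: u) = pvT u + (u.toFinset.card : Int) - (if a ∈ u then 1 else 0) := by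
  have hsplit : ∀ v : Int, pvCG (a :: u) v = pvCG u v + (if v < a then 1 else 0) := by
    intro v
    unfold pvCG
    rw [List.countP_cons]
    split <;> simp_all
  by_cases hmem : a ∈ u
  · have hmem' : a ∈ u.toFinset := by simpa using hmem
    have hfs : (a :: u).toFinset = u.toFinset := by
      rw [List.toFinset_cons, Finset.insert_eq_self.mpr hmem']
    unfold pvT
    rw [hfs, if_pos hmem]
    calc ∑ v ∈ u.toFinset, pvCG (a :: u) v
        = ∑ v ∈ u.toFinset, (pvCG u v + (if v < a then 1 else 0)) :=
          Finset.sum_congr rfl (fun v _ => hsplit v)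
      _ = (∑ v ∈ u.toFinset, pvCG u v) + ∑ v ∈ u.toFinset, (if v < a then (1:Int) else 0) :=
          Finset.sum_add_distrib
      _ = pvT u + ((u.toFinset.filter (· < a)).card : Int) := by
          rw [Finset.sum_boole]; rfl
      _ = pvT u + ((u.toFinset.card : Int) - 1) := by
          have hfilter : u.toFinset.filter (· < a) = u.toFinset.erase a := by
            ext v
            simp only [Finset.mem_filter, Finset.mem_erase, List.mem_toFinset]
            constructor
            · rintro ⟨hv, hlt⟩; exact ⟨by omega, hv⟩
            · rintro ⟨hne, hv⟩
              exact ⟨hv, lt_of_le_of_ne (hmax v hv) hne⟩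
          rw [hfilter, Finset.card_erase_of_mem (by simpa using hmem)]
          have hpos : 1 ≤ u.toFinset.card := Finset.card_pos.mpr ⟨a, by simpa using hmem⟩
          push_cast [Nat.cast_sub hpos]
          ring
      _ = pvT u + (u.toFinset.card : Int) - 1 := by ring
  · have hfs : (a :: u).toFinset = insert a u.toFinset := List.toFinset_cons
    unfold pvT
    have hmem' : a ∉ u.toFinset := by simpa using hmem
    rw [hfs, Finset.sum_insert hmem']
    have hzero : pvCG (a :: u) a = 0 := by
      rw [hsplit a, if_neg (lt_irrefl a)]
      unfold pvCG
      rw [List.countP_eq_zero.mpr (by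
        intro y hy
        simp only [decide_eq_true_eq]
        exact not_lt.mpr (hmax y hy))]
      ring
    rw [hzero]
    calc (0:Int) + ∑ v ∈ u.toFinset, pvCG (a :: u) v
        = ∑ v ∈ u.toFinset, (pvCG u v + (if v < a then 1 else 0)) := by
          rw [zero_add]; exact Finset.sum_congr rfl (fun v _ => hsplit v)
      _ = (∑ v ∈ u.toFinset, pvCG u v) + ∑ v ∈ u.toFinset, (if v < a then (1:Int) else 0) :=
          Finset.sum_add_distrib
      _ = pvT u + ((u.toFinset.filter (· < a)).card : Int) := by
          rw [Finset.sum_boole]; rfl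
      _ = pvT u + (u.toFinset.card : Int) - (if a ∈ u then 1 else 0) := by
          have hfilter : u.toFinset.filter (· < a) = u.toFinset := by
            ext v
            simp only [Finset.mem_filter, List.mem_toFinset]
            refine ⟨fun h => h.1, fun hv => ⟨hv, ?_⟩⟩
            exact lt_of_le_of_ne (hmax v hv) (fun h => hmem (h ▸ hv))
          rw [hfilter, if_neg hmem]
          ring

-- main A-side identity: the boundary sum equals the taller-pile sum over distinct values
lemma pvSA_eq_pvT (s : List Int) (hp : s.Pairwise (fun x y => y ≤ x)) :
    pvSA s = pvT s := by
  induction s with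
  | nil => simp [pvSA, pvT_nil]
  | cons a u ih =>
    match u with
    | [] => simp [pvSA, pvT_single]
    | b :: t =>
      have hpu : (b :: t).Pairwise (fun x y => y ≤ x) := (List.pairwise_cons.mp hp).2
      have hmax : ∀ y ∈ b :: t, y ≤ a := (List.pairwise_cons.mp hp).1
      rw [pvSA_cons, ih hpu, pvC_eq (b :: t) hpu (by simp),
        pvT_cons a (b :: t) hmax]
      by_cases hab : a = b
      · rw [if_neg (by simp [hab]), if_pos ((mem_tail_iff a b t hp).mpr hab)]
        ring
      · rw [if_pos (Ne.symm hab),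
          if_neg (fun hmem => hab ((mem_tail_iff a b t hp).mp hmem))]
        ring

lemma pvT_perm (l l' : List Int) (h : l.Perm l') : pvT l = pvT l' := by
  unfold pvT
  rw [List.toFinset_eq_of_perm _ _ h]
  exact Finset.sum_congr rfl (fun v _ => by unfold pvCG; rw [h.countP_eq])

-- ===== VERDICT (by name: the statement is the Claim_ definition above) =====
theorem minStepsBalance_spec : Claim_equal_minStepsBalance := by
  intro piles _
  unfold Spec_minStepsBalance
  rw [alt_eq_pvT]
  by_cases h : piles.length < 2
  · match piles, h with
    | [], _ => simp [minStepsBalance, pvT_nil]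
    | [x], _ => simp [minStepsBalance, pvT_single]
  · rw [A_eq_pvSA piles h,
      pvSA_eq_pvT _ (PySem.List.sorted_pairwise_rev piles (fun x : Int => x)),
      pvT_perm _ piles (PySem.List.sorted_perm piles (fun x : Int => x) true)]
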